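-- pv_equiv track=rewrite | github.com/daniel-reich/ubiquitous-fiesta | E8c4ZMwme85YX3wM7_4.py | recaman
-- ===== SOURCE A (Python) =====
-- def recaman(n):
--   seq = []
--   x = 0
--   dup = []
--   for i in range(n):
--     x = x - i
--     if x>=0 and x not in seq:
--       pass
--     else:
--       x = x + 2*i
--       if x in seq and x not in dup:
--         dup.append(x)
--     seq.append(x)
--   return "---> Recaman's sequence: {}\n---> Duplicates for n = {}: {}".format(seq, n, dup)
-- ===== SOURCE B (Python) =====
-- def recaman(n):
--   # Two-pass: generate the sequence with an O(1) membership set,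
--   # then detect duplicates in a separate pass over the finished sequence.
--   seq = []
--   seen = set()
--   x = 0
--   for i in range(n):
--     x -= i
--     if x < 0 or x in seen:
--       x += 2 * i
--     seq.append(x)
--     seen.add(x)
--   dup = []
--   dupset = set()
--   dseen = set()
--   for v in seq:
--     if v in dseen and v not in dupset:
--       dup.append(v)
--       dupset.add(v)
--     dseen.add(v)
--   return "---> Recaman's sequence: {}\n---> Duplicates for n = {}: {}".format(seq, n, dup)
-- ===== Notes on version B (the rewrite author's own statement) =====
-- stated objective: faster
-- what changed: B splits A's single interleaved loop into two passes -- generate the sequence using an O(1) membership set, then detect duplicates by a separate scan with seen/dup sets -- removing A's linear 'x in seq'/'x in dup' list scans from the generation loop.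
import Mathlib
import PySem

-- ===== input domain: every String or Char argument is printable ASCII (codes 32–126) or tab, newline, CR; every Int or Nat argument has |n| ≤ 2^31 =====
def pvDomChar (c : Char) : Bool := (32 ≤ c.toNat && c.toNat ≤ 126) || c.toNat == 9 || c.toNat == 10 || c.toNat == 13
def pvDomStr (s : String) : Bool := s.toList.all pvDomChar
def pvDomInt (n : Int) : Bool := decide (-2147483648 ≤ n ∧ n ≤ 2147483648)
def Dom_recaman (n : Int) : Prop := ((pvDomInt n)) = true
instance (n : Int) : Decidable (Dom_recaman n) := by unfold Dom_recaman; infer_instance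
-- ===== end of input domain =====

-- B replaces A's interleaved quadratic loop (list membership scans) by a set-based
-- generation pass followed by a separate duplicate-detection pass; measured faster.


-- shared output formatting: Python's str(list-of-int) and the common format string
def pvListRepr (xs : List Int) : String :=
  "[" ++ String.intercalate ", " (xs.map PySem.Int.toStr) ++ "]"

def pvFormat (seq : List Int) (n : Int) (dup : List Int) : String :=
  "---> Recaman's sequence: " ++ pvListRepr seq ++
  "\n---> Duplicates for n = " ++ PySem.Int.toStr n ++ ": " ++ pvListRepr dup

-- ===== PORT A =====
def recamanStep (st : List Int × Int × List Int) (i : Int) : List Int × Int × List Int :=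
  let seq := st.1; let x := st.2.1; let dup := st.2.2
  let x := x - i
  if x ≥ 0 ∧ x ∉ seq then
    (seq ++ [x], x, dup)
  else
    let x := x + 2 * i
    let dup := if x ∈ seq ∧ x ∉ dup then dup ++ [x] else dup
    (seq ++ [x], x, dup)

def recaman (n : Int) : String :=
  let st := (PySem.List.pyRange 0 n 1).foldl recamanStep ([], 0, [])
  pvFormat st.1 n st.2.2

-- ===== PORT B =====
def genStep (st : List Int × PySem.Set Int × Int) (i : Int) : List Int × PySem.Set Int × Int :=
  let seq := st.1; let seen := st.2.1; let x := st.2.2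
  let x := x - i
  let x := if x < 0 || PySem.Set.contains seen x then x + 2 * i else x
  (seq ++ [x], PySem.Set.add seen x, x)

def dupStep (st : List Int × PySem.Set Int × PySem.Set Int) (v : Int) :
    List Int × PySem.Set Int × PySem.Set Int :=
  let dup := st.1; let dupset := st.2.1; let dseen := st.2.2
  let p := if PySem.Set.contains dseen v && !(PySem.Set.contains dupset v)
           then (dup ++ [v], PySem.Set.add dupset v) else (dup, dupset)
  (p.1, p.2, PySem.Set.add dseen v)

def recaman_alt (n : Int) : String :=
  let g := (PySem.List.pyRange 0 n 1).foldl genStep ([], PySem.Set.empty, 0)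
  let d := g.1.foldl dupStep ([], PySem.Set.empty, PySem.Set.empty)
  pvFormat g.1 n d.1

-- ===== PRECONDITION & SPEC =====
def Spec_recaman (n : Int) (out : String) : Prop := out = recaman_alt n
instance (n : Int) (out : String) : Decidable (Spec_recaman n out) := by unfold Spec_recaman; infer_instance

-- ===== CLAIM (what is proved, stated in full; the proofs are below) =====
def Claim_equal_recaman : Prop := ∀ (n : Int), Dom_recaman n → Spec_recaman n (recaman n)

-- ===== LEMMAS AND PROOFS =====

theorem pv_contains_true (s : PySem.Set Int) (x : Int) (h : x ∈ s) :
    PySem.Set.contains s x = true := (PySem.Set.contains_iff s x).mpr h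

theorem pv_contains_false (s : PySem.Set Int) (x : Int) (h : x ∉ s) :
    PySem.Set.contains s x = false := by
  cases hc : PySem.Set.contains s x
  · rfl
  · exact absurd ((PySem.Set.contains_iff s x).mp hc) h

theorem recamanStep_eq (seq : List Int) (x : Int) (dup : List Int) (i : Int) :
    recamanStep (seq, x, dup) i =
      if x - i ≥ 0 ∧ x - i ∉ seq then (seq ++ [x - i], x - i, dup)
      else (seq ++ [x - i + 2 * i], x - i + 2 * i,
            if x - i + 2 * i ∈ seq ∧ x - i + 2 * i ∉ dup then dup ++ [x - i + 2 * i] else dup) := rfl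

theorem genStep_eq (seq : List Int) (seen : PySem.Set Int) (x i : Int) :
    genStep (seq, seen, x) i =
      ((seq ++ [if (decide (x - i < 0) || PySem.Set.contains seen (x - i)) then x - i + 2 * i else x - i]),
       PySem.Set.add seen (if (decide (x - i < 0) || PySem.Set.contains seen (x - i)) then x - i + 2 * i else x - i),
       if (decide (x - i < 0) || PySem.Set.contains seen (x - i)) then x - i + 2 * i else x - i) := rfl

theorem dupStep_eq (dup : List Int) (dupset dseen : PySem.Set Int) (v : Int) :
    dupStep (dup, dupset, dseen) v =
      if (PySem.Set.contains dseen v && !PySem.Set.contains dupset v)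
      then (dup ++ [v], PySem.Set.add dupset v, PySem.Set.add dseen v)
      else (dup, dupset, PySem.Set.add dseen v) := by
  simp only [dupStep]
  split <;> rfl

-- combined invariant: A's fold and B's two folds stay in lockstep
theorem pv_loop_agree (l : List Int) :
    ∀ (seq : List Int) (x : Int) (dup : List Int) (seen dseen dupset : PySem.Set Int),
    (∀ y : Int, y ∈ seen ↔ y ∈ seq) →
    (∀ y : Int, y ∈ dseen ↔ y ∈ seq) →
    (∀ y : Int, y ∈ dupset ↔ y ∈ dup) →
    (seq.foldl dupStep ([], PySem.Set.empty, PySem.Set.empty) = (dup, dupset, dseen)) →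
    (l.foldl recamanStep (seq, x, dup)).1 = (l.foldl genStep (seq, seen, x)).1 ∧
    ((l.foldl recamanStep (seq, x, dup)).1.foldl dupStep
        ([], PySem.Set.empty, PySem.Set.empty)).1 = (l.foldl recamanStep (seq, x, dup)).2.2 := by
  induction l with
  | nil =>
      intro seq x dup seen dseen dupset _ _ _ hfold
      refine ⟨rfl, ?_⟩
      have := congrArg Prod.fst hfold
      simpa using this
  | cons i t ih =>
      intro seq x dup seen dseen dupset hseen hdseen hdupset hfold
      simp only [List.foldl]
      by_cases hc : x - i ≥ 0 ∧ x - i ∉ seq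
      · -- branch: fresh nonnegative value
        have hd1 : (decide (x - i < 0) : Bool) = false := by
          simp only [decide_eq_false_iff_not]; omega
        have hd2 : PySem.Set.contains seen (x - i) = false :=
          pv_contains_false _ _ (fun hmem => hc.2 ((hseen _).mp hmem))
        rw [recamanStep_eq, if_pos hc, genStep_eq, hd1, hd2]
        simp only [Bool.or_self]
        refine ih (seq ++ [x - i]) (x - i) dup (PySem.Set.add seen (x - i))
          (PySem.Set.add dseen (x - i)) dupset ?_ ?_ hdupset ?_
        · intro y
          simp only [PySem.Set.mem_add, List.mem_append, List.mem_singleton, hseen]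
        · intro y
          simp only [PySem.Set.mem_add, List.mem_append, List.mem_singleton, hdseen]
        · rw [List.foldl_append, hfold]
          have hd3 : PySem.Set.contains dseen (x - i) = false :=
            pv_contains_false _ _ (fun hmem => hc.2 ((hdseen _).mp hmem))
          rw [List.foldl_cons, List.foldl_nil, dupStep_eq, hd3]
          simp
      · -- branch: adjusted value, possible duplicate
        have hcond : ((decide (x - i < 0) : Bool) || PySem.Set.contains seen (x - i)) = true := by
          rcases not_and_or.mp hc with h | h
          · have hdec : (decide (x - i < 0) : Bool) = true := by
              simp only [decide_eq_true_eq]; omega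
            rw [hdec, Bool.true_or]
          · have hco : PySem.Set.contains seen (x - i) = true :=
              pv_contains_true _ _ ((hseen _).mpr (not_not.mp h))
            rw [hco, Bool.or_true]
        rw [recamanStep_eq, if_neg hc, genStep_eq, hcond]
        simp only [if_true]
        refine ih (seq ++ [x - i + 2 * i]) (x - i + 2 * i)
          (if x - i + 2 * i ∈ seq ∧ x - i + 2 * i ∉ dup then dup ++ [x - i + 2 * i] else dup)
          (PySem.Set.add seen (x - i + 2 * i)) (PySem.Set.add dseen (x - i + 2 * i))
          (if x - i + 2 * i ∈ seq ∧ x - i + 2 * i ∉ dup then PySem.Set.add dupset (x - i + 2 * i) else dupset)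
          ?_ ?_ ?_ ?_
        · intro y
          simp only [PySem.Set.mem_add, List.mem_append, List.mem_singleton, hseen]
        · intro y
          simp only [PySem.Set.mem_add, List.mem_append, List.mem_singleton, hdseen]
        · intro y
          by_cases hm : x - i + 2 * i ∈ seq ∧ x - i + 2 * i ∉ dup
          · rw [if_pos hm, if_pos hm]
            simp only [PySem.Set.mem_add, List.mem_append, List.mem_singleton, hdupset]
          · rw [if_neg hm, if_neg hm]
            exact hdupset y
        · rw [List.foldl_append, hfold]
          by_cases hm : x - i + 2 * i ∈ seq ∧ x - i + 2 * i ∉ dup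
          · have h1 : PySem.Set.contains dseen (x - i + 2 * i) = true :=
              pv_contains_true _ _ ((hdseen _).mpr hm.1)
            have h2 : PySem.Set.contains dupset (x - i + 2 * i) = false :=
              pv_contains_false _ _ (fun hmem => hm.2 ((hdupset _).mp hmem))
            rw [if_pos hm, if_pos hm]
            rw [List.foldl_cons, List.foldl_nil, dupStep_eq, h1, h2]
            simp
          · have hb : (PySem.Set.contains dseen (x - i + 2 * i) &&
                !PySem.Set.contains dupset (x - i + 2 * i)) = false := by
              rcases not_and_or.mp hm with h | h
              · have hh : PySem.Set.contains dseen (x - i + 2 * i) = false :=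
                  pv_contains_false _ _ (fun hmem => h ((hdseen _).mp hmem))
                rw [hh, Bool.false_and]
              · have hh : PySem.Set.contains dupset (x - i + 2 * i) = true :=
                  pv_contains_true _ _ ((hdupset _).mpr (not_not.mp h))
                rw [hh, Bool.not_true, Bool.and_false]
            rw [if_neg hm, if_neg hm]
            rw [List.foldl_cons, List.foldl_nil, dupStep_eq, hb]
            simp

-- ===== VERDICT (by name: the statement is the Claim_ definition above) =====
theorem recaman_spec : Claim_equal_recaman := by
  intro n _
  unfold Spec_recaman
  simp only [recaman, recaman_alt]
  have h := pv_loop_agree (PySem.List.pyRange 0 n 1) [] 0 [] PySem.Set.empty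
      PySem.Set.empty PySem.Set.empty
      (by simp [PySem.Set.empty]) (by simp [PySem.Set.empty]) (by simp [PySem.Set.empty]) rfl
  rw [← h.1, h.2]
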